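-- pv_equiv track=rewrite | github.com/tlawal/weatherquant | backend/ingestion/metar.py | should_poll_station
-- ===== SOURCE A (Python) =====
-- def should_poll_station(
--     observation_minutes: list[int], now_minute: int,
--     pre_window: int = 2, post_window: int = 10,
--     window: int | None = None,
-- ) -> bool:
--     """Return True if now_minute is within [-pre_window, +post_window] of any observation minute.
--
--     Asymmetric window: poll from 2 min before to 10 min after each observation
--     minute, covering delayed appearances on aviationweather.gov.
--     Legacy `window` param is accepted but ignored.
--     """
--     for m in observation_minutes:
--         diff = (now_minute - m) % 60
--         if diff <= post_window or diff >= (60 - pre_window):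
--             return True
--     return False
-- ===== SOURCE B (Python) =====
-- def should_poll_station(
--     observation_minutes, now_minute,
--     pre_window=2, post_window=10,
--     window=None,
-- ):
--     """Precompute the set of clock minutes at which polling fires, then test now.
--
--     A window of 60 minutes or more already spans the whole hour, so each
--     side is clamped to 60 before enumerating offsets.
--     """
--     pre = min(pre_window, 60)
--     post = min(post_window, 60)
--     trigger = set()
--     for m in observation_minutes:
--         for d in range(post + 1):
--             trigger.add((m + d) % 60)
--         for d in range(1, pre + 1):
--             trigger.add((m - d) % 60)
--     return now_minute % 60 in trigger
-- ===== Notes on version B (the rewrite author's own statement) =====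
-- stated objective: alternative
-- what changed: Instead of scanning observations and testing each modular distance with an early return, B clamps each window side to one hour (60 minutes already covers every clock minute), builds the set of all triggering clock minutes once, and returns whether now_minute % 60 is in that set.
import Mathlib
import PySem

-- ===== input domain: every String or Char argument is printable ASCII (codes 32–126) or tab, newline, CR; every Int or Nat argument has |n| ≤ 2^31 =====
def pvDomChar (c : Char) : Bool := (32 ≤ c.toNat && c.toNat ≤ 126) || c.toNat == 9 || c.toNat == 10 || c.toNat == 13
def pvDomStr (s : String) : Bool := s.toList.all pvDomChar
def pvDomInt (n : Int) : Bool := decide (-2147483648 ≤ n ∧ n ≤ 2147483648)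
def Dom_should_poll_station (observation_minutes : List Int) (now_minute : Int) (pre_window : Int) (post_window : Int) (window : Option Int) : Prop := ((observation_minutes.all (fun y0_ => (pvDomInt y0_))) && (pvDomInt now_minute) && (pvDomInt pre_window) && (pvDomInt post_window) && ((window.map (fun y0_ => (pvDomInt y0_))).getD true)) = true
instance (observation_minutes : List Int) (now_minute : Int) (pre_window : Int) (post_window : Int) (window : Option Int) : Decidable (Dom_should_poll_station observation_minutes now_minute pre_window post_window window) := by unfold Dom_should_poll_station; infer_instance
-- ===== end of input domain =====

-- B clamps each window side to one hour, builds the set of triggering clock minutes once and tests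
-- membership, replacing A's per-observation modular-distance scan; same cost class ("alternative").

-- ===== PORT A =====
-- Literal port of A: scan the observations, early-return on the first in-window one.
def should_poll_station (observation_minutes : List Int) (now_minute : Int) (pre_window : Int) (post_window : Int) (window : Option Int) : Bool :=
  match observation_minutes with
  | [] => false
  | m :: rest =>
      let diff := PySem.Int.mod (now_minute - m) 60
      if diff ≤ post_window ∨ diff ≥ 60 - pre_window then true
      else should_poll_station rest now_minute pre_window post_window window

-- ===== PORT B =====
-- B's inner loops for one observation minute m (pre/post already clamped by the caller):
-- add its post- and pre-window minutes to the set.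
def pvTriggerAdd (pre post : Int) (s : PySem.Set Int) (m : Int) : PySem.Set Int :=
  let s1 := (PySem.List.pyRange 0 (post + 1) 1).foldl
      (fun s d => PySem.Set.add s (PySem.Int.mod (m + d) 60)) s
  (PySem.List.pyRange 1 (pre + 1) 1).foldl
      (fun s d => PySem.Set.add s (PySem.Int.mod (m - d) 60)) s1

def should_poll_station_alt (observation_minutes : List Int) (now_minute : Int) (pre_window : Int) (post_window : Int) (window : Option Int) : Bool :=
  let pre := min pre_window 60
  let post := min post_window 60
  let trigger := observation_minutes.foldl (pvTriggerAdd pre post) PySem.Set.empty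
  PySem.Set.contains trigger (PySem.Int.mod now_minute 60)

-- ===== PRECONDITION & SPEC =====
def Spec_should_poll_station (observation_minutes : List Int) (now_minute : Int) (pre_window : Int) (post_window : Int) (window : Option Int) (out : Bool) : Prop := out = should_poll_station_alt observation_minutes now_minute pre_window post_window window
instance (observation_minutes : List Int) (now_minute : Int) (pre_window : Int) (post_window : Int) (window : Option Int) (out : Bool) : Decidable (Spec_should_poll_station observation_minutes now_minute pre_window post_window window out) := by unfold Spec_should_poll_station; infer_instance

-- ===== CLAIM (what is proved, stated in full; the proofs are below) =====
def Claim_equal_should_poll_station : Prop := ∀ (observation_minutes : List Int) (now_minute : Int) (pre_window : Int) (post_window : Int) (window : Option Int), Dom_should_poll_station observation_minutes now_minute pre_window post_window window → Spec_should_poll_station observation_minutes now_minute pre_window post_window window (should_poll_station observation_minutes now_minute pre_window post_window window)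

-- ===== LEMMAS AND PROOFS =====

lemma mem_set_add (s : List Int) (y x : Int) : x ∈ PySem.Set.add s y ↔ x ∈ s ∨ x = y := by
  unfold PySem.Set.add
  split_ifs with hc
  · constructor
    · exact Or.inl
    · rintro (h | rfl)
      · exact h
      · exact List.contains_iff_mem.mp hc
  · simp

-- Membership after a fold of Set.add over the image of a list.
lemma mem_foldl_add (l : List Int) (f : Int → Int) (s : List Int) (x : Int) :
    x ∈ l.foldl (fun s d => PySem.Set.add s (f d)) s ↔ x ∈ s ∨ ∃ d ∈ l, f d = x := by
  induction l generalizing s with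
  | nil => simp
  | cons a t ih =>
      rw [List.foldl_cons, ih, mem_set_add]
      constructor
      · rintro ((h | h) | ⟨d, hd, he⟩)
        · exact Or.inl h
        · exact Or.inr ⟨a, List.mem_cons_self, h.symm⟩
        · exact Or.inr ⟨d, List.mem_cons_of_mem _ hd, he⟩
      · rintro (h | ⟨d, hd, he⟩)
        · exact Or.inl (Or.inl h)
        · rcases List.mem_cons.mp hd with rfl | hd
          · exact Or.inl (Or.inr he.symm)
          · exact Or.inr ⟨d, hd, he⟩

-- A's per-element condition.
def pvCondA (now_minute pre_window post_window m : Int) : Prop :=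
  PySem.Int.mod (now_minute - m) 60 ≤ post_window ∨
  PySem.Int.mod (now_minute - m) 60 ≥ 60 - pre_window

lemma a_true_iff (obs : List Int) (now pre post : Int) (w : Option Int) :
    should_poll_station obs now pre post w = true ↔ ∃ m ∈ obs, pvCondA now pre post m := by
  induction obs with
  | nil => simp [should_poll_station]
  | cons m rest ih =>
      show (if PySem.Int.mod (now - m) 60 ≤ post ∨ PySem.Int.mod (now - m) 60 ≥ 60 - pre
            then true else should_poll_station rest now pre post w) = true ↔ _
      split_ifs with h
      · constructor
        · intro _; exact ⟨m, List.mem_cons_self, h⟩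
        · intro _; rfl
      · rw [ih]
        constructor
        · rintro ⟨mm, hm, hc⟩; exact ⟨mm, List.mem_cons_of_mem _ hm, hc⟩
        · rintro ⟨mm, hm, hc⟩
          rcases List.mem_cons.mp hm with rfl | hm
          · exact absurd hc h
          · exact ⟨mm, hm, hc⟩

-- One observation's contribution to the trigger set, characterised.
lemma mem_triggerAdd (pre post : Int) (s : List Int) (m x : Int) :
    x ∈ pvTriggerAdd pre post s m ↔ x ∈ s ∨
      ((∃ d ∈ PySem.List.pyRange 0 (post + 1) 1, PySem.Int.mod (m + d) 60 = x) ∨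
       (∃ d ∈ PySem.List.pyRange 1 (pre + 1) 1, PySem.Int.mod (m - d) 60 = x)) := by
  unfold pvTriggerAdd
  rw [mem_foldl_add, mem_foldl_add, or_assoc]

-- The arithmetic heart: B's membership condition (with windows clamped to 60) matches A's
-- modular-distance test.
lemma cond_iff (now pre post m : Int) :
    ((∃ d ∈ PySem.List.pyRange 0 (min post 60 + 1) 1, PySem.Int.mod (m + d) 60 = PySem.Int.mod now 60) ∨
     (∃ d ∈ PySem.List.pyRange 1 (min pre 60 + 1) 1, PySem.Int.mod (m - d) 60 = PySem.Int.mod now 60))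
    ↔ pvCondA now pre post m := by
  have h60 : (0:Int) < 60 := by norm_num
  simp only [PySem.List.mem_pyRange_one, PySem.Int.mod_eq_emod_of_pos h60, pvCondA]
  constructor
  · rintro (⟨d, ⟨hd0, hd1⟩, he⟩ | ⟨d, ⟨hd0, hd1⟩, he⟩)
    · left; omega
    · right; omega
  · rintro (h | h)
    · left; exact ⟨(now - m) % 60, ⟨by omega, by omega⟩, by omega⟩
    · right; exact ⟨(m - now - 1) % 60 + 1, ⟨by omega, by omega⟩, by omega⟩

lemma b_true_iff (obs : List Int) (now pre post : Int) (w : Option Int) :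
    should_poll_station_alt obs now pre post w = true ↔ ∃ m ∈ obs, pvCondA now pre post m := by
  have key : ∀ (s : List Int), PySem.Int.mod now 60 ∈ obs.foldl (pvTriggerAdd (min pre 60) (min post 60)) s ↔
      PySem.Int.mod now 60 ∈ s ∨ ∃ m ∈ obs, pvCondA now pre post m := by
    induction obs with
    | nil => simp
    | cons a t ih =>
        intro s
        rw [List.foldl_cons, ih, mem_triggerAdd, cond_iff]
        constructor
        · rintro ((h | h) | ⟨mm, hm, hc⟩)
          · exact Or.inl h
          · exact Or.inr ⟨a, List.mem_cons_self, h⟩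
          · exact Or.inr ⟨mm, List.mem_cons_of_mem _ hm, hc⟩
        · rintro (h | ⟨mm, hm, hc⟩)
          · exact Or.inl (Or.inl h)
          · rcases List.mem_cons.mp hm with rfl | hm
            · exact Or.inl (Or.inr hc)
            · exact Or.inr ⟨mm, hm, hc⟩
  show PySem.Set.contains _ _ = true ↔ _
  rw [show ∀ (t : List Int) (x : Int), (PySem.Set.contains t x = true ↔ x ∈ t) from
        fun t x => List.contains_iff_mem]
  rw [key PySem.Set.empty]
  simp [PySem.Set.empty]

-- ===== VERDICT (by name: the statement is the Claim_ definition above) =====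
theorem should_poll_station_spec : Claim_equal_should_poll_station := by
  intro obs now pre post w _
  unfold Spec_should_poll_station
  rw [Bool.eq_iff_iff, a_true_iff, b_true_iff]
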